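-- pv_equiv track=rewrite | github.com/sofa566/rasa-for-botfront | rasa/utils/common.py | update_existing_keys
-- ===== SOURCE A (Python) =====
-- from typing import (
--     Any,
--     Coroutine,
--     Dict,
--     List,
--     Optional,
--     Text,
--     Type,
--     TypeVar,
--     Union,
--     ContextManager,
--     Set,
-- )
--
-- def update_existing_keys(
--     original: Dict[Any, Any], updates: Dict[Any, Any]
-- ) -> Dict[Any, Any]:
--     """Iterate through all the updates and update a value in the original dictionary.
--
--     If the updates contain a key that is not present in the original dict, it will
--     be ignored."""
--
--     updated = original.copy()
--     for k, v in updates.items():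
--         if k in updated:
--             updated[k] = v
--     return updated
-- ===== SOURCE B (Python) =====
-- def update_existing_keys(original, updates):
--     """Return original with values replaced by updates for keys present in both.
--
--     Builds a fresh dict in one comprehension driven by `original`; neither
--     argument is mutated."""
--     return {k: updates[k] if k in updates else v for k, v in original.items()}
-- ===== Notes on version B (the rewrite author's own statement) =====
-- stated objective: idiomatic
-- what changed: Instead of copying `original` and mutating it while looping over `updates`, B builds the result in a single comprehension driven by `original.items()`, taking each value from `updates` when its key is present there.
import Mathlib
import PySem

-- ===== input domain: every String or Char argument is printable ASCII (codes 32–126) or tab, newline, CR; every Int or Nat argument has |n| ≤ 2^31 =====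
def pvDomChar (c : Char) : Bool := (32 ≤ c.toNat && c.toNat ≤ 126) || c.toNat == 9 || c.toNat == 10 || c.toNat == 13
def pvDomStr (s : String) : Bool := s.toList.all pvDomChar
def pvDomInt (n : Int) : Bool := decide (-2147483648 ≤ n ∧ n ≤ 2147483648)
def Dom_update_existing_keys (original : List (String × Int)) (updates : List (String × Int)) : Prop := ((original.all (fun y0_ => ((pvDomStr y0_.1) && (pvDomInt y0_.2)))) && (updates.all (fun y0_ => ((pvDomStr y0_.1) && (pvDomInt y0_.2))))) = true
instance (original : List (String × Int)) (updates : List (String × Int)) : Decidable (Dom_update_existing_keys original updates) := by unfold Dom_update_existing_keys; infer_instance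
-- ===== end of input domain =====

-- B replaces A's copy-then-mutate loop over `updates` with one comprehension driven by `original` (objective: idiomatic).

-- ===== PORT A =====
-- updated = original.copy(); for k, v in updates.items(): if k in updated: updated[k] = v; return updated
def update_existing_keys (original : List (String × Int)) (updates : List (String × Int)) : List (String × Int) :=
  let upd : PySem.Dict String Int := PySem.Dict.ofList updates
  let updated :=
    upd.items.foldl
      (fun d p => if d.contains p.1 then d.insert p.1 p.2 else d)
      (PySem.Dict.ofList original)
  updated.items

-- ===== PORT B =====
-- {k: updates[k] if k in updates else v for k, v in original.items()}
def update_existing_keys_alt (original : List (String × Int)) (updates : List (String × Int)) : List (String × Int) :=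
  let upd : PySem.Dict String Int := PySem.Dict.ofList updates
  (PySem.Dict.ofList original).items.map
    (fun p => (p.1, if upd.contains p.1 then upd.getD p.1 p.2 else p.2))

-- ===== PRECONDITION & SPEC =====
def Spec_update_existing_keys (original : List (String × Int)) (updates : List (String × Int)) (out : List (String × Int)) : Prop := out = update_existing_keys_alt original updates
instance (original : List (String × Int)) (updates : List (String × Int)) (out : List (String × Int)) : Decidable (Spec_update_existing_keys original updates out) := by unfold Spec_update_existing_keys; infer_instance

-- ===== CLAIM (what is proved, stated in full; the proofs are below) =====
def Claim_equal_update_existing_keys : Prop := ∀ (original : List (String × Int)) (updates : List (String × Int)), Dom_update_existing_keys original updates → Spec_update_existing_keys original updates (update_existing_keys original updates)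

-- ===== LEMMAS AND PROOFS =====

-- Items of A's update loop over a key-Nodup pair list, from a key-Nodup start.
theorem items_update_loop (l : List (String × Int)) (d : PySem.Dict String Int)
    (hd : d.keys.Nodup) (hl : (l.map Prod.fst).Nodup) :
    (l.foldl (fun d p => if d.contains p.1 then d.insert p.1 p.2 else d) d).items
      = d.items.map (fun p => (p.1, ((PySem.Dict.mk l).get? p.1).getD p.2)) := by
  induction l generalizing d with
  | nil => simp [PySem.Dict.get?]
  | cons hdp t ih =>
    obtain ⟨k, v⟩ := hdp
    simp only [List.map_cons, List.nodup_cons] at hl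
    simp only [List.foldl_cons]
    by_cases hc : d.contains k = true
    · rw [if_pos hc, ih _ (by simp [PySem.Dict.keys_insert_of_contains _ _ hc, hd]) hl.2,
        PySem.Dict.items_insert_of_contains _ _ hc, List.map_map]
      apply List.map_congr_left
      intro p hp
      by_cases hk : p.1 = k
      · have hnone : (PySem.Dict.mk t).get? k = none := by
          rw [PySem.Dict.get?_eq_none_iff_not_mem_keys]
          simpa [PySem.Dict.keys_mk] using hl.1
        simp [Function.comp, hk, PySem.Dict.get?_mk_cons, hnone]
      · simp [Function.comp, hk, PySem.Dict.get?_mk_cons, Ne.symm hk]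
    · rw [if_neg hc, ih _ hd hl.2]
      apply List.map_congr_left
      intro p hp
      have hk : p.1 ≠ k := by
        intro h
        have : p.1 ∈ d.keys := PySem.Dict.mem_keys_of_mem_items _ hp
        rw [h] at this
        exact hc ((PySem.Dict.contains_iff_mem_keys d k).mpr this)
      simp [PySem.Dict.get?_mk_cons, Ne.symm hk]

theorem update_existing_keys_eq_alt (original updates : List (String × Int)) :
    update_existing_keys original updates = update_existing_keys_alt original updates := by
  unfold update_existing_keys update_existing_keys_alt
  have hu : (PySem.Dict.mk (PySem.Dict.ofList updates).items) = PySem.Dict.ofList updates := rfl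
  rw [items_update_loop _ _ (PySem.Dict.nodup_keys_ofList original)
    (by simpa [PySem.Dict.keys] using PySem.Dict.nodup_keys_ofList updates)]
  apply List.map_congr_left
  intro p hp
  rw [hu]
  by_cases hc : (PySem.Dict.ofList updates).contains p.1 = true
  · rcases Option.isSome_iff_exists.mp (by rw [← PySem.Dict.contains_eq_isSome_get? (PySem.Dict.ofList updates) p.1]; exact hc) with ⟨w, hw⟩
    simp [hc, hw, PySem.Dict.getD_of_get?_eq_some _ _ hw]
  · simp only [Bool.not_eq_true] at hc
    have : (PySem.Dict.ofList updates).get? p.1 = none := by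
      rw [PySem.Dict.get?_eq_none_iff_contains, hc]
    simp [hc, this]

-- ===== VERDICT (by name: the statement is the Claim_ definition above) =====
theorem update_existing_keys_spec : Claim_equal_update_existing_keys := by
  intro original updates _
  exact update_existing_keys_eq_alt original updates
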